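-- pv_equiv track=rewrite | github.com/Upsilion-Sigma-Eta/BaekjoonOnlineJudge | SolutionSourceCode/23562번_골드_5_ㄷ 만들기.py | sliding_winodw
-- ===== SOURCE A (Python) =====
-- import copy
--
-- def sliding_winodw(grid, k, a, b):
--     window = []
--     window_width = k * 3
--     window_height = k * 3
--
--     total_cost = set()
--     # 슬라이딩 윈도우 크기만큼 전체 영역을 휩쓸면서 값을 계산
--     cost = 0
--
--     for i in range(len(grid) - window_height + 1):
--         for j in range(len(grid[0]) - window_width + 1):
--             cost = 0
--             temp_grid = copy.deepcopy(grid)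
--             for i_i in range(window_height):
--                 for j_j in range(window_width):
--                     if (0 <= i_i < k):
--                         cost += 0 if grid[i + i_i][j + j_j] == '#' else a
--                     elif (k <= i_i < k * 2 and 0 <= j_j < k):
--                         cost += 0 if grid[i + i_i][j + j_j] == '#' else a
--                     elif (k * 2 <= i_i < k * 3):
--                         cost += 0 if grid[i + i_i][j + j_j] == '#' else a
--                     else:
--                         cost += 0 if grid[i + i_i][j + j_j] == '.' else b
--                     temp_grid[i + i_i][j + j_j] = '@'
--
--             for i_i in range(len(grid)):
--                 for j_j in range(len(grid[0])):
--                     if temp_grid[i_i][j_j] != '@':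
--                         cost += 0 if grid[i_i][j_j] == '.' else b
--
--             total_cost.add(cost)
--
--     return total_cost
-- ===== SOURCE B (Python) =====
-- def sliding_winodw(grid, k, a, b):
--     # Count the grid's inked (non-empty) cells once; each placement then needs only
--     # one pass over its own window plus a closed formula for everything outside it.
--     rows = len(grid)
--     cols = len(grid[0]) if grid else 0
--     h = 3 * k
--     total_ink = 0
--     for row in grid:
--         for c in row[:cols]:
--             if c != '.':
--                 total_ink += 1
--     costs = set()
--     for i in range(rows - h + 1):
--         for j in range(cols - h + 1):
--             sharp = 0      # '#' cells under the stamp shape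
--             hole_ink = 0   # inked cells inside the hole
--             win_ink = 0    # inked cells anywhere in the window
--             for t in range(h):
--                 row = grid[i + t]
--                 for u in range(h):
--                     c = row[j + u]
--                     if c != '.':
--                         win_ink += 1
--                     if t < k or t >= 2 * k or u < k:
--                         if c == '#':
--                             sharp += 1
--                     elif c != '.':
--                         hole_ink += 1
--             costs.add(a * (7 * k * k - sharp)
--                       + b * hole_ink
--                       + b * (total_ink - win_ink))
--     return costs
-- ===== Notes on version B (the rewrite author's own statement) =====
-- stated objective: faster
-- what changed: B counts the grid's inked (non-'.') cells once and computes each placement's cost from a single window pass plus the closed formula outside-cost = b*(total_ink - window_ink), instead of A's per-placement grid deepcopy, '@'-marking and full-grid rescan; …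
-- outside the precondition, e.g. on sliding_winodw([['.']], -1, 1, 1): A returns {0}, B returns {7}
import Mathlib
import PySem

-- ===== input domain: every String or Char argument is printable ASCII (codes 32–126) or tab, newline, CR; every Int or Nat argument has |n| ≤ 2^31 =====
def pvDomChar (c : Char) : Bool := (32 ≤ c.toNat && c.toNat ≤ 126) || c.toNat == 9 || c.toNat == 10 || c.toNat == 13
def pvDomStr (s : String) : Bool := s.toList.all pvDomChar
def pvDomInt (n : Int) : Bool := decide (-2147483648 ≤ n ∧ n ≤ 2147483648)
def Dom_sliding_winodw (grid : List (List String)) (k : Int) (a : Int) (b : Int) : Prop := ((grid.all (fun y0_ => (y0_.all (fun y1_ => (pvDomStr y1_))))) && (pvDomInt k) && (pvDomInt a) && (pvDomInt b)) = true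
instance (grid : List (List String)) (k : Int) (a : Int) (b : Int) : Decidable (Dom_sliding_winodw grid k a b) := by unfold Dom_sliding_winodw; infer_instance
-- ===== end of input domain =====

-- B counts the grid's inked cells once and prices each placement with one window pass plus
-- a closed formula for the outside, replacing A's per-placement deepcopy, '@'-marking and
-- full-grid rescan (an asymptotically smaller amount of work; equality is claimed on Pre_).

-- ===== PORT A =====
-- grid[x][y]; exact for the indices A's loops evaluate on inputs Pre_ admits (nonnegative, in range)
def pvGet2 (g : List (List String)) (x y : Int) : String :=
  (PySem.List.pyGet? ((PySem.List.pyGet? g x).getD []) y).getD ""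

-- temp_grid[x][y] = v; exact for the nonnegative in-range indices A's loops produce
def pvSet2 (g : List (List String)) (x y : Int) (v : String) : List (List String) :=
  g.set x.toNat ((g.getD x.toNat []).set y.toNat v)

-- A's window double loop: state (cost, temp_grid), started at (0, deepcopy(grid))
def pvAwindow (grid : List (List String)) (k : Int) (a : Int) (b : Int) (i : Int) (j : Int) :
    Int × List (List String) :=
  (PySem.List.pyRange 0 (k * 3) 1).foldl (fun st ii =>
    (PySem.List.pyRange 0 (k * 3) 1).foldl (fun st jj =>
      (st.1 +
        (if 0 ≤ ii ∧ ii < k then (if pvGet2 grid (i + ii) (j + jj) = "#" then 0 else a)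
         else if (k ≤ ii ∧ ii < k * 2) ∧ (0 ≤ jj ∧ jj < k) then (if pvGet2 grid (i + ii) (j + jj) = "#" then 0 else a)
         else if k * 2 ≤ ii ∧ ii < k * 3 then (if pvGet2 grid (i + ii) (j + jj) = "#" then 0 else a)
         else (if pvGet2 grid (i + ii) (j + jj) = "." then 0 else b)),
       pvSet2 st.2 (i + ii) (j + jj) "@")) st) ((0 : Int), grid)

-- A's second double loop: scan the whole grid, charging cells temp_grid does not mark '@'
def pvAoutside (grid : List (List String)) (b : Int) (temp : List (List String)) (cost : Int) : Int :=
  (PySem.List.pyRange 0 ((grid.length : Int)) 1).foldl (fun cost ii =>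
    (PySem.List.pyRange 0 ((((PySem.List.pyGet? grid 0).getD []).length : Int)) 1).foldl (fun cost jj =>
      if pvGet2 temp ii jj ≠ "@" then cost + (if pvGet2 grid ii jj = "." then 0 else b) else cost)
      cost) cost

def sliding_winodw (grid : List (List String)) (k : Int) (a : Int) (b : Int) : List Int :=
  let windowHeight := k * 3
  let windowWidth := k * 3
  (PySem.List.pyRange 0 ((grid.length : Int) - windowHeight + 1) 1).foldl (fun totalCost i =>
    (PySem.List.pyRange 0 ((((PySem.List.pyGet? grid 0).getD []).length : Int) - windowWidth + 1) 1).foldl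
      (fun totalCost j =>
        let st := pvAwindow grid k a b i j
        PySem.Set.add totalCost (pvAoutside grid b st.2 st.1)) totalCost)
    (PySem.Set.empty)

-- ===== PORT B =====
-- B: total_ink, the count of non-'.' cells over every row's first `cols` entries
def pvTotalInk (grid : List (List String)) (cols : Int) : Int :=
  grid.foldl (fun s row =>
    (PySem.List.slice row none (some cols)).foldl (fun s c => if c ≠ "." then s + 1 else s) s) 0

-- B: one window pass computing (sharp, hole_ink, win_ink)
def pvBwin (grid : List (List String)) (k : Int) (h : Int) (i : Int) (j : Int) : Int × Int × Int :=
  (PySem.List.pyRange 0 h 1).foldl (fun tr t =>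
    let row := (PySem.List.pyGet? grid (i + t)).getD []
    (PySem.List.pyRange 0 h 1).foldl (fun tr u =>
      let c := (PySem.List.pyGet? row (j + u)).getD ""
      let tr := if c ≠ "." then (tr.1, tr.2.1, tr.2.2 + 1) else tr
      if t < k ∨ 2 * k ≤ t ∨ u < k then (if c = "#" then (tr.1 + 1, tr.2) else tr)
      else if c ≠ "." then (tr.1, tr.2.1 + 1, tr.2.2) else tr) tr)
    ((0 : Int), (0 : Int), (0 : Int))

def sliding_winodw_alt (grid : List (List String)) (k : Int) (a : Int) (b : Int) : List Int :=
  let rows : Int := grid.length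
  let cols : Int := if grid.length = 0 then 0 else (((PySem.List.pyGet? grid 0).getD []).length : Int)
  let h := 3 * k
  let totalInk := pvTotalInk grid cols
  (PySem.List.pyRange 0 (rows - h + 1) 1).foldl (fun costs i =>
    (PySem.List.pyRange 0 (cols - h + 1) 1).foldl (fun costs j =>
      let tr := pvBwin grid k h i j
      PySem.Set.add costs
        (a * (7 * k * k - tr.1) + b * tr.2.1 + b * (totalInk - tr.2.2))) costs)
    (PySem.Set.empty)

-- ===== PRECONDITION & SPEC =====
-- Pre_ restricts to the task's natural domain: a positive stamp size k and, only when a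
-- placement actually fits, a uniform-width board of '.'/'#' cells (every row at least as wide
-- as the first, each cell of that width '.' or '#').  Outside it A raises IndexError on a
-- too-short row, and on malformed boards or k ≤ 0 it returns values tied to its in-place '@'
-- marker and empty window loops, which B's marker-free algorithm does not reproduce.
def Pre_sliding_winodw (grid : List (List String)) (k : Int) (a : Int) (b : Int) : Prop :=
  0 < k ∧ ((3 * k ≤ (grid.length : Int) ∧ 3 * k ≤ (((grid.headD []).length : Nat) : Int)) →
    (∀ row ∈ grid, (grid.headD []).length ≤ row.length) ∧
    (∀ row ∈ grid, ∀ c ∈ row.take (grid.headD []).length, c = "." ∨ c = "#"))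
instance (grid : List (List String)) (k : Int) (a : Int) (b : Int) : Decidable (Pre_sliding_winodw grid k a b) := by unfold Pre_sliding_winodw; infer_instance

def pvWitness_sliding_winodw : List (List String) × Int × Int × Int :=
  ([["#", "."], [".", "#"]], 1, 2, 3)

def Spec_sliding_winodw (grid : List (List String)) (k : Int) (a : Int) (b : Int) (out : List Int) : Prop := out = sliding_winodw_alt grid k a b
instance (grid : List (List String)) (k : Int) (a : Int) (b : Int) (out : List Int) : Decidable (Spec_sliding_winodw grid k a b out) := by unfold Spec_sliding_winodw; infer_instance

-- ===== CLAIM (what is proved, stated in full; the proofs are below) =====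
def Claim_equal_sliding_winodw : Prop := ∀ (grid : List (List String)) (k : Int) (a : Int) (b : Int), Dom_sliding_winodw grid k a b → Pre_sliding_winodw grid k a b → Spec_sliding_winodw grid k a b (sliding_winodw grid k a b)

-- ===== LEMMAS AND PROOFS =====

def pvGetN (g : List (List String)) (x y : Nat) : String := (g.getD x []).getD y ""

theorem pvGet2_natCast (g : List (List String)) (x y : Nat) : pvGet2 g ↑x ↑y = pvGetN g x y := by
  simp [pvGet2, pvGetN, PySem.List.pyGet?_natCast, List.getD_eq_getElem?_getD]

theorem length_pvSet2 (g : List (List String)) (x y : Int) (v : String) :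
    (pvSet2 g x y v).length = g.length := by simp [pvSet2]

theorem getD_eq_getElem_of_lt (g : List (List String)) (x : Nat) (hx : x < g.length) :
    g.getD x [] = g[x] := by
  simp [List.getD_eq_getElem?_getD, List.getElem?_eq_getElem hx]

theorem rowlen_pvSet2 (g : List (List String)) (x y : Int) (v : String) (r : Nat) :
    ((pvSet2 g x y v).getD r []).length = ((g.getD r []).length) := by
  simp only [pvSet2, List.getD_eq_getElem?_getD, List.getElem?_set]
  by_cases h : x.toNat = r
  · by_cases hlt : r < g.length
    · simp [h, hlt, List.getElem?_eq_getElem hlt]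
    · simp [h, hlt, List.getElem?_eq_none (l := g) (by omega : g.length ≤ r)]
  · simp [h]

theorem pvGetN_pvSet2 (g : List (List String)) (x' y' : Int) (v : String)
    (hx' : 0 ≤ x') (hy' : 0 ≤ y') (x y : Nat) (hx : x < g.length) (hy : y < (g.getD x []).length) :
    pvGetN (pvSet2 g x' y' v) x y = if x' = ↑x ∧ y' = ↑y then v else pvGetN g x y := by
  rw [getD_eq_getElem_of_lt g x hx] at hy
  simp only [pvGetN, pvSet2, List.getD_eq_getElem?_getD, List.getElem?_set]
  by_cases h1 : x'.toNat = x
  · by_cases h2 : y'.toNat = y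
    · have heq : x' = ↑x ∧ y' = ↑y := by omega
      simp [heq, hx, List.getElem?_set, hy, h1, h2]
    · have : ¬(x' = ↑x ∧ y' = ↑y) := by omega
      simp [this, h1, hx, List.getElem?_set, h2]
  · have : ¬(x' = ↑x ∧ y' = ↑y) := by omega
    simp [this, h1]

theorem foldl_prod_split {T : Type} (l : List Int) (f : Int → Int) (u : T → Int → T) (c : Int) (t : T) :
    l.foldl (fun st y => (st.1 + f y, u st.2 y)) (c, t) = (c + (l.map f).sum, l.foldl u t) := by
  induction l generalizing c t with
  | nil => simp
  | cons y l ih => simp [ih]; ring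

theorem foldl2_prod_split {T : Type} (l₁ l₂ : List Int) (f : Int → Int → Int) (u : T → Int → Int → T)
    (c : Int) (t : T) :
    l₁.foldl (fun st x => l₂.foldl (fun st y => (st.1 + f x y, u st.2 x y)) st) (c, t)
      = (c + (l₁.map (fun x => (l₂.map (f x)).sum)).sum,
         l₁.foldl (fun t x => l₂.foldl (fun t y => u t x y) t) t) := by
  induction l₁ generalizing c t with
  | nil => simp
  | cons x l ih =>
    rw [List.foldl_cons, foldl_prod_split l₂ (f x) (fun t y => u t x y) c t, ih]
    refine Prod.ext ?_ rfl
    simp; ring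

theorem foldl_foldl_eq_flatMap {T : Type} (l₁ l₂ : List Int) (F G : Int → Int) (f : T → Int × Int → T) (t : T) :
    l₁.foldl (fun t x => l₂.foldl (fun t y => f t (F x, G y)) t) t
      = (l₁.flatMap fun x => l₂.map (fun y => (F x, G y))).foldl f t := by
  induction l₁ generalizing t with
  | nil => simp
  | cons x l ih => simp [List.foldl_append, List.foldl_map, ih]

theorem pvGetN_foldl_mark (ps : List (Int × Int)) (hps : ∀ p ∈ ps, 0 ≤ p.1 ∧ 0 ≤ p.2)
    (g : List (List String)) (x y : Nat) (hx : x < g.length) (hy : y < (g.getD x []).length) :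
    pvGetN (ps.foldl (fun t p => pvSet2 t p.1 p.2 "@") g) x y
      = if ((x : Int), (y : Int)) ∈ ps then "@" else pvGetN g x y := by
  induction ps generalizing g with
  | nil => simp
  | cons p ps ih =>
    have hp := hps p (by simp)
    have hx' : x < (pvSet2 g p.1 p.2 "@").length := by rw [length_pvSet2]; exact hx
    have hy' : y < ((pvSet2 g p.1 p.2 "@").getD x []).length := by rw [rowlen_pvSet2]; exact hy
    rw [List.foldl_cons, ih (fun q hq => hps q (by simp [hq])) _ hx' hy',
      pvGetN_pvSet2 g p.1 p.2 "@" hp.1 hp.2 x y hx hy]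
    by_cases hpe : p = ((x : Int), (y : Int))
    · subst hpe; simp
    · have : ¬(p.1 = ↑x ∧ p.2 = ↑y) := by
        intro h; exact hpe (Prod.ext h.1 h.2)
      have h2 : ¬(((x : Int), (y : Int)) = p) := fun h => hpe h.symm
      simp [this, h2]

theorem foldl_ite_add {β : Type} (l : List β) (p : β → Prop) [DecidablePred p] (f : β → Int) (c : Int) :
    l.foldl (fun c x => if p x then c + f x else c) c
      = c + (l.map (fun x => if p x then f x else 0)).sum := by
  induction l generalizing c with
  | nil => simp
  | cons x l ih => by_cases h : p x <;> simp [h, ih] <;> ring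

def pvW (grid : List (List String)) (k : Int) (a : Int) (b : Int) (i : Int) (j : Int) (ii jj : Int) : Int :=
  if 0 ≤ ii ∧ ii < k then (if pvGet2 grid (i + ii) (j + jj) = "#" then 0 else a)
  else if (k ≤ ii ∧ ii < k * 2) ∧ (0 ≤ jj ∧ jj < k) then (if pvGet2 grid (i + ii) (j + jj) = "#" then 0 else a)
  else if k * 2 ≤ ii ∧ ii < k * 3 then (if pvGet2 grid (i + ii) (j + jj) = "#" then 0 else a)
  else (if pvGet2 grid (i + ii) (j + jj) = "." then 0 else b)

theorem pvAwindow_eq (grid : List (List String)) (k a b i j : Int) :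
    pvAwindow grid k a b i j =
      (((PySem.List.pyRange 0 (k*3) 1).map (fun ii =>
          ((PySem.List.pyRange 0 (k*3) 1).map (fun jj => pvW grid k a b i j ii jj)).sum)).sum,
       ((PySem.List.pyRange 0 (k*3) 1).flatMap (fun ii =>
          (PySem.List.pyRange 0 (k*3) 1).map (fun jj => (i + ii, j + jj)))).foldl
         (fun t p => pvSet2 t p.1 p.2 "@") grid) := by
  unfold pvAwindow
  rw [foldl2_prod_split (PySem.List.pyRange 0 (k*3) 1) (PySem.List.pyRange 0 (k*3) 1)
    (fun ii jj =>
      if 0 ≤ ii ∧ ii < k then (if pvGet2 grid (i + ii) (j + jj) = "#" then 0 else a)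
      else if (k ≤ ii ∧ ii < k * 2) ∧ (0 ≤ jj ∧ jj < k) then (if pvGet2 grid (i + ii) (j + jj) = "#" then 0 else a)
      else if k * 2 ≤ ii ∧ ii < k * 3 then (if pvGet2 grid (i + ii) (j + jj) = "#" then 0 else a)
      else (if pvGet2 grid (i + ii) (j + jj) = "." then 0 else b))
    (fun t ii jj => pvSet2 t (i + ii) (j + jj) "@") 0 grid]
  rw [foldl_foldl_eq_flatMap (PySem.List.pyRange 0 (k*3) 1) (PySem.List.pyRange 0 (k*3) 1)
    (fun ii => i + ii) (fun jj => j + jj) (fun t p => pvSet2 t p.1 p.2 "@") grid]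
  simp [pvW]

def pvChInd (c : String) : Int := if c ≠ "." then 1 else 0

def pvSharpInd (k t u : Int) (c : String) : Int := if (t < k ∨ 2 * k ≤ t ∨ u < k) ∧ c = "#" then 1 else 0

def pvHoleInd (k t u : Int) (c : String) : Int := if ¬(t < k ∨ 2 * k ≤ t ∨ u < k) ∧ c ≠ "." then 1 else 0

theorem bstep_eq (k t u : Int) (c : String) (tr : Int × Int × Int) :
    (let tr' := if c ≠ "." then (tr.1, tr.2.1, tr.2.2 + 1) else tr
     if t < k ∨ 2 * k ≤ t ∨ u < k then (if c = "#" then (tr'.1 + 1, tr'.2) else tr')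
     else if c ≠ "." then (tr'.1, tr'.2.1 + 1, tr'.2.2) else tr')
    = (tr.1 + pvSharpInd k t u c, tr.2.1 + pvHoleInd k t u c, tr.2.2 + pvChInd c) := by
  by_cases h1 : t < k ∨ 2 * k ≤ t ∨ u < k <;> by_cases h2 : c = "#" <;> by_cases h3 : c = "." <;>
    simp only [pvSharpInd, pvHoleInd, pvChInd, h1, h2, h3, if_pos, if_neg, not_true, not_false_iff,
      ite_true, ite_false, and_true, and_false, true_and, false_and, not_and, if_true, if_false] <;>
    first
      | (subst h2; simp_all)
      | simp [h1, h2, h3]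

theorem foldl_triple_split (l : List Int) (f g h : Int → Int) (c : Int × Int × Int) :
    l.foldl (fun tr y => (tr.1 + f y, tr.2.1 + g y, tr.2.2 + h y)) c
      = (c.1 + (l.map f).sum, c.2.1 + (l.map g).sum, c.2.2 + (l.map h).sum) := by
  induction l generalizing c with
  | nil => simp
  | cons y l ih => simp [ih]; refine ⟨by ring, by ring, by ring⟩

theorem foldl2_triple_split (l₁ l₂ : List Int) (f g h : Int → Int → Int) (c : Int × Int × Int) :
    l₁.foldl (fun tr x => l₂.foldl (fun tr y => (tr.1 + f x y, tr.2.1 + g x y, tr.2.2 + h x y)) tr) c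
      = (c.1 + (l₁.map (fun x => (l₂.map (f x)).sum)).sum,
         c.2.1 + (l₁.map (fun x => (l₂.map (g x)).sum)).sum,
         c.2.2 + (l₁.map (fun x => (l₂.map (h x)).sum)).sum) := by
  induction l₁ generalizing c with
  | nil => simp
  | cons x l ih =>
    rw [List.foldl_cons, foldl_triple_split l₂ (f x) (g x) (h x) c, ih]
    refine Prod.ext ?_ (Prod.ext ?_ ?_) <;> simp <;> ring

theorem pvBwin_eq (grid : List (List String)) (k h i j : Int) :
    pvBwin grid k h i j =
      (((PySem.List.pyRange 0 h 1).map (fun t => ((PySem.List.pyRange 0 h 1).map (fun u => pvSharpInd k t u (pvGet2 grid (i + t) (j + u)))).sum)).sum,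
       ((PySem.List.pyRange 0 h 1).map (fun t => ((PySem.List.pyRange 0 h 1).map (fun u => pvHoleInd k t u (pvGet2 grid (i + t) (j + u)))).sum)).sum,
       ((PySem.List.pyRange 0 h 1).map (fun t => ((PySem.List.pyRange 0 h 1).map (fun u => pvChInd (pvGet2 grid (i + t) (j + u)))).sum)).sum) := by
  unfold pvBwin
  refine Eq.trans (PySem.List.foldl_congr_mem _ _
    (fun tr t => (PySem.List.pyRange 0 h 1).foldl (fun tr u =>
      (tr.1 + pvSharpInd k t u (pvGet2 grid (i + t) (j + u)),
       tr.2.1 + pvHoleInd k t u (pvGet2 grid (i + t) (j + u)),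
       tr.2.2 + pvChInd (pvGet2 grid (i + t) (j + u)))) tr) _ ?_) ?_
  · intro acc t _
    refine PySem.List.foldl_congr_mem _ _ _ _ ?_
    intro acc2 u _
    exact bstep_eq k t u (pvGet2 grid (i + t) (j + u)) acc2
  · rw [foldl2_triple_split]
    simp

theorem pvAoutside_eq (grid : List (List String)) (b : Int) (temp : List (List String)) (cost : Int) :
    pvAoutside grid b temp cost = cost +
      ((PySem.List.pyRange 0 ((grid.length : Int)) 1).map (fun ii =>
        ((PySem.List.pyRange 0 ((((PySem.List.pyGet? grid 0).getD []).length : Int)) 1).map (fun jj =>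
          if pvGet2 temp ii jj ≠ "@" then (if pvGet2 grid ii jj = "." then 0 else b) else 0)).sum)).sum := by
  unfold pvAoutside
  refine Eq.trans (PySem.List.foldl_congr_mem _ _
    (fun cost ii => cost +
      ((PySem.List.pyRange 0 ((((PySem.List.pyGet? grid 0).getD []).length : Int)) 1).map (fun jj =>
        if pvGet2 temp ii jj ≠ "@" then (if pvGet2 grid ii jj = "." then 0 else b) else 0)).sum) _ ?_) ?_
  · intro acc ii _
    exact foldl_ite_add _ (fun jj => pvGet2 temp ii jj ≠ "@") _ acc
  · rw [PySem.List.foldl_add]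

theorem foldl_count_eq (l : List String) (s : Int) :
    l.foldl (fun s c => if c ≠ "." then s + 1 else s) s = s + (l.map pvChInd).sum := by
  induction l generalizing s with
  | nil => simp
  | cons c l ih =>
    have hstep : (if c ≠ "." then s + 1 else s) = s + pvChInd c := by
      by_cases h : c = "." <;> simp [h, pvChInd]
    rw [List.foldl_cons, hstep, ih]
    simp
    ring

theorem map_take_sum (l : List String) (W : Nat) (hW : W ≤ l.length) :
    ((l.take W).map pvChInd).sum = ∑ y ∈ Finset.range W, pvChInd (l.getD y "") := by
  induction W generalizing l with
  | zero => simp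
  | succ n ih =>
    cases l with
    | nil => simp at hW
    | cons c l =>
      rw [List.take_succ_cons, List.map_cons, List.sum_cons, ih l (by simpa using hW),
        Finset.sum_range_succ']
      simp [List.getD_cons_succ, List.getD_cons_zero]
      ring

theorem foldl_rows_sum (g : List (List String)) (f : List String → Int) (s : Int) :
    g.foldl (fun s row => s + f row) s = s + ∑ x ∈ Finset.range g.length, f (g.getD x []) := by
  induction g generalizing s with
  | nil => simp
  | cons r g ih =>
    rw [List.foldl_cons, ih, List.length_cons, Finset.sum_range_succ']
    simp [List.getD_cons_succ, List.getD_cons_zero]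
    ring

theorem pvTotalInk_eq (grid : List (List String)) (W : Nat)
    (hrow : ∀ row ∈ grid, W ≤ row.length) :
    pvTotalInk grid ((W : Nat) : Int)
      = ∑ x ∈ Finset.range grid.length, ∑ y ∈ Finset.range W, pvChInd (pvGetN grid x y) := by
  unfold pvTotalInk
  have hstep : ∀ (s : Int), ∀ row ∈ grid,
      (PySem.List.slice row none (some ((W : Nat) : Int))).foldl (fun s c => if c ≠ "." then s + 1 else s) s
        = s + ∑ y ∈ Finset.range W, pvChInd (row.getD y "") := by
    intro s row hr
    rw [PySem.List.slice_to_natCast, foldl_count_eq, map_take_sum row W (hrow row hr)]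
  refine Eq.trans (PySem.List.foldl_congr_mem _ _
    (fun s row => s + ∑ y ∈ Finset.range W, pvChInd (row.getD y "")) _
    (fun s row hr => hstep s row hr)) ?_
  rw [foldl_rows_sum]
  simp [pvGetN]

theorem sum_pyRange_eq (n : Nat) (f : Int → Int) :
    ((PySem.List.pyRange 0 (n : Int) 1).map f).sum = ∑ q ∈ Finset.range n, f (q : Int) := by
  rw [PySem.List.pyRange_one]
  have h1 : (((n : Int) - 0).toNat) = n := by omega
  rw [h1, List.map_map]
  have base : ∀ (g : Nat → Int), ((List.range n).map g).sum = ∑ q ∈ Finset.range n, g q := fun _ => rfl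
  rw [base]
  exact Finset.sum_congr rfl (fun q _ => by simp)

theorem sum_range_ite_le (m n : Nat) : ∑ u ∈ Finset.range n, (if m ≤ u then (1 : Int) else 0) = ↑(n - m) := by
  rw [Finset.sum_boole]
  have : (Finset.range n).filter (fun u => m ≤ u) = Finset.Ico m n := by
    ext x; simp [Finset.mem_Ico]; omega
  rw [this, Nat.card_Ico]

theorem sum_range_ite_mid (m1 m2 n : Nat) (c : Int) (h : m2 ≤ n) :
    ∑ t ∈ Finset.range n, (if m1 ≤ t ∧ t < m2 then c else 0) = c * ↑(m2 - m1) := by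
  have : ∀ t, (if m1 ≤ t ∧ t < m2 then c else 0) = c * (if m1 ≤ t ∧ t < m2 then 1 else 0) := by
    intro t; by_cases h : m1 ≤ t ∧ t < m2 <;> simp [h]
  simp only [this]
  rw [← Finset.mul_sum, Finset.sum_boole]
  have : (Finset.range n).filter (fun t => m1 ≤ t ∧ t < m2) = Finset.Ico m1 m2 := by
    ext x; simp [Finset.mem_Ico]; omega
  rw [this, Nat.card_Ico]

theorem sum_shift (R hh iN : Nat) (hle : iN + hh ≤ R) (F : Nat → Int) :
    ∑ x ∈ Finset.range R, (if iN ≤ x ∧ x < iN + hh then F x else 0) = ∑ t ∈ Finset.range hh, F (iN + t) := by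
  rw [← Finset.sum_filter]
  have : (Finset.range R).filter (fun x => iN ≤ x ∧ x < iN + hh) = Finset.Ico iN (iN + hh) := by
    ext x; simp [Finset.mem_Ico]; omega
  rw [this, Finset.sum_Ico_eq_sum_range]
  simp

theorem cell_identity (k a b t u : Int) (c : String) (ht0 : 0 ≤ t) (ht3 : t < k * 3) (hu0 : 0 ≤ u) :
    (if 0 ≤ t ∧ t < k then (if c = "#" then 0 else a)
     else if (k ≤ t ∧ t < k * 2) ∧ (0 ≤ u ∧ u < k) then (if c = "#" then 0 else a)
     else if k * 2 ≤ t ∧ t < k * 3 then (if c = "#" then 0 else a)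
     else (if c = "." then 0 else b))
    = a * (if t < k ∨ 2 * k ≤ t ∨ u < k then 1 else 0)
      - a * pvSharpInd k t u c + b * pvHoleInd k t u c := by
  unfold pvSharpInd pvHoleInd
  by_cases hs : t < k ∨ 2 * k ≤ t ∨ u < k
  · have hA : (if 0 ≤ t ∧ t < k then (if c = "#" then 0 else a)
       else if (k ≤ t ∧ t < k * 2) ∧ (0 ≤ u ∧ u < k) then (if c = "#" then 0 else a)
       else if k * 2 ≤ t ∧ t < k * 3 then (if c = "#" then 0 else a)
       else (if c = "." then 0 else b)) = (if c = "#" then 0 else a) := by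
      rcases hs with h | h | h
      · rw [if_pos ⟨ht0, h⟩]
      · rw [if_neg (by omega), if_neg (by omega), if_pos (by omega)]
      · by_cases h1 : t < k
        · rw [if_pos ⟨ht0, h1⟩]
        · by_cases h2 : k * 2 ≤ t
          · rw [if_neg (by omega), if_neg (by omega), if_pos ⟨h2, ht3⟩]
          · rw [if_neg (by omega), if_pos ⟨⟨by omega, by omega⟩, ⟨hu0, h⟩⟩]
    rw [hA]
    by_cases hc : c = "#" <;> simp [hc, hs]
  · have hA : (if 0 ≤ t ∧ t < k then (if c = "#" then 0 else a)
       else if (k ≤ t ∧ t < k * 2) ∧ (0 ≤ u ∧ u < k) then (if c = "#" then 0 else a)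
       else if k * 2 ≤ t ∧ t < k * 3 then (if c = "#" then 0 else a)
       else (if c = "." then 0 else b)) = (if c = "." then 0 else b) := by
      rw [if_neg (by omega), if_neg (by omega), if_neg (by omega)]
    rw [hA]
    by_cases hc : c = "." <;> simp [hc, hs]

theorem hole_count (κ : Nat) :
    ∑ t ∈ Finset.range (3 * κ), (∑ u ∈ Finset.range (3 * κ),
      (if ¬((t : Int) < (κ : Int) ∨ 2 * (κ : Int) ≤ (t : Int) ∨ (u : Int) < (κ : Int)) then (1 : Int) else 0))
      = 2 * κ * κ := by
  have inner : ∀ t : Nat, (∑ u ∈ Finset.range (3 * κ),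
      (if ¬((t : Int) < (κ : Int) ∨ 2 * (κ : Int) ≤ (t : Int) ∨ (u : Int) < (κ : Int)) then (1 : Int) else 0))
      = (if κ ≤ t ∧ t < 2 * κ then ((2 * κ : Nat) : Int) else 0) := by
    intro t
    by_cases ht : κ ≤ t ∧ t < 2 * κ
    · rw [if_pos ht]
      have : ∀ u : Nat, (if ¬((t : Int) < (κ : Int) ∨ 2 * (κ : Int) ≤ (t : Int) ∨ (u : Int) < (κ : Int)) then (1 : Int) else 0)
          = (if κ ≤ u then (1 : Int) else 0) := by
        intro u; apply if_congr (by omega) rfl rfl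
      simp only [this]
      rw [sum_range_ite_le]
      congr 1; omega
    · rw [if_neg ht]
      apply Finset.sum_eq_zero
      intro u _
      rw [if_neg (by omega)]
  simp only [inner]
  rw [sum_range_ite_mid κ (2 * κ) (3 * κ) _ (by omega)]
  have h2 : 2 * κ - κ = κ := by omega
  rw [h2]; push_cast; ring

theorem shape_count (κ : Nat) :
    ∑ t ∈ Finset.range (3 * κ), (∑ u ∈ Finset.range (3 * κ),
      (if ((t : Int) < (κ : Int) ∨ 2 * (κ : Int) ≤ (t : Int) ∨ (u : Int) < (κ : Int)) then (1 : Int) else 0))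
      = 7 * κ * κ := by
  have point : ∀ t u : Nat,
      (if ((t : Int) < (κ : Int) ∨ 2 * (κ : Int) ≤ (t : Int) ∨ (u : Int) < (κ : Int)) then (1 : Int) else 0)
      = 1 - (if ¬((t : Int) < (κ : Int) ∨ 2 * (κ : Int) ≤ (t : Int) ∨ (u : Int) < (κ : Int)) then (1 : Int) else 0) := by
    intro t u
    by_cases h : ((t : Int) < (κ : Int) ∨ 2 * (κ : Int) ≤ (t : Int) ∨ (u : Int) < (κ : Int))
    · rw [if_pos h, if_neg (by omega)]; ring
    · rw [if_neg h, if_pos h]; ring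
  have step := Finset.sum_congr rfl (fun t (_ : t ∈ Finset.range (3 * κ)) =>
    Finset.sum_congr rfl (fun u (_ : u ∈ Finset.range (3 * κ)) => point t u))
  rw [step]
  simp only [Finset.sum_sub_distrib]
  rw [hole_count]
  simp [Finset.card_range]
  ring

theorem mem_winList (i j : Int) (hh : Nat) (x y : Nat) :
    (((x : Int), (y : Int)) ∈ (PySem.List.pyRange 0 ((hh : Nat) : Int) 1).flatMap (fun ii =>
      (PySem.List.pyRange 0 ((hh : Nat) : Int) 1).map (fun jj => (i + ii, j + jj))))
    ↔ (i ≤ (x : Int) ∧ (x : Int) < i + hh ∧ j ≤ (y : Int) ∧ (y : Int) < j + hh) := by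
  simp only [List.mem_flatMap, List.mem_map, PySem.List.mem_pyRange_one, Prod.mk.injEq]
  constructor
  · rintro ⟨ii, ⟨h0, h1⟩, jj, ⟨h2, h3⟩, he1, he2⟩
    omega
  · rintro ⟨h1, h2, h3, h4⟩
    exact ⟨(x : Int) - i, ⟨by omega, by omega⟩, (y : Int) - j, ⟨by omega, by omega⟩, by omega, by omega⟩

theorem winList_nonneg (i j : Int) (hh : Nat) (hi : 0 ≤ i) (hj : 0 ≤ j) :
    ∀ p ∈ (PySem.List.pyRange 0 ((hh : Nat) : Int) 1).flatMap (fun ii =>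
      (PySem.List.pyRange 0 ((hh : Nat) : Int) 1).map (fun jj => (i + ii, j + jj))),
      0 ≤ p.1 ∧ 0 ≤ p.2 := by
  intro p hp
  simp only [List.mem_flatMap, List.mem_map, PySem.List.mem_pyRange_one] at hp
  obtain ⟨ii, ⟨h0, _⟩, jj, ⟨h2, _⟩, he⟩ := hp
  subst he
  constructor <;> simp <;> omega

theorem placement_cost_eq (grid : List (List String)) (k a b i j : Int)
    (hk : 0 < k)
    (hrow : ∀ row ∈ grid, ((PySem.List.pyGet? grid 0).getD []).length ≤ row.length)
    (hdom : ∀ x y : Nat, x < grid.length → y < ((PySem.List.pyGet? grid 0).getD []).length →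
      pvGetN grid x y = "." ∨ pvGetN grid x y = "#")
    (hi : 0 ≤ i) (hi2 : i + k * 3 ≤ (grid.length : Int))
    (hj : 0 ≤ j) (hj2 : j + k * 3 ≤ ((((PySem.List.pyGet? grid 0).getD []).length : Nat) : Int)) :
    pvAoutside grid b (pvAwindow grid k a b i j).2 (pvAwindow grid k a b i j).1
      = a * (7 * k * k - (pvBwin grid k (3 * k) i j).1)
        + b * (pvBwin grid k (3 * k) i j).2.1
        + b * (pvTotalInk grid ((((PySem.List.pyGet? grid 0).getD []).length : Nat) : Int)
            - (pvBwin grid k (3 * k) i j).2.2) := by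
  set W := ((PySem.List.pyGet? grid 0).getD []).length with hWdef
  set R := grid.length with hRdef
  set κ := k.toNat with hκdef
  have hkκ : k = (κ : Int) := by omega
  have h3k : k * 3 = ((3 * κ : Nat) : Int) := by push_cast; omega
  have h3k' : 3 * k = ((3 * κ : Nat) : Int) := by push_cast; omega
  set iN := i.toNat with hiNdef
  set jN := j.toNat with hjNdef
  have hiN : i = (iN : Int) := by omega
  have hjN : j = (jN : Int) := by omega
  have hiR : iN + 3 * κ ≤ R := by omega
  have hjW : jN + 3 * κ ≤ W := by omega
  have hrow' : ∀ x : Nat, x < R → W ≤ (grid.getD x []).length := by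
    intro x hx
    have hmem : grid.getD x [] ∈ grid := by
      rw [getD_eq_getElem_of_lt grid x hx]; exact List.getElem_mem hx
    exact hrow _ hmem
  rw [pvAwindow_eq, pvAoutside_eq, pvBwin_eq, pvTotalInk_eq grid W hrow]
  simp only [h3k, h3k', sum_pyRange_eq]
  have hcell : ∀ t u : Nat, pvGet2 grid (i + (t : Int)) (j + (u : Int)) = pvGetN grid (iN + t) (jN + u) := by
    intro t u
    have e1 : i + (t : Int) = ((iN + t : Nat) : Int) := by omega
    have e2 : j + (u : Int) = ((jN + u : Nat) : Int) := by omega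
    rw [e1, e2, pvGet2_natCast]
  -- A's window sum via the per-cell identity
  have hwin : (∑ t ∈ Finset.range (3 * κ), ∑ u ∈ Finset.range (3 * κ),
        pvW grid k a b i j (t : Int) (u : Int))
      = a * (7 * κ * κ)
        - a * (∑ t ∈ Finset.range (3 * κ), ∑ u ∈ Finset.range (3 * κ),
            pvSharpInd k (t : Int) (u : Int) (pvGetN grid (iN + t) (jN + u)))
        + b * (∑ t ∈ Finset.range (3 * κ), ∑ u ∈ Finset.range (3 * κ),
            pvHoleInd k (t : Int) (u : Int) (pvGetN grid (iN + t) (jN + u))) := by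
    have hpt : ∀ t ∈ Finset.range (3 * κ), ∀ u ∈ Finset.range (3 * κ),
        pvW grid k a b i j (t : Int) (u : Int)
          = a * (if (t : Int) < k ∨ 2 * k ≤ (t : Int) ∨ (u : Int) < k then 1 else 0)
            - a * pvSharpInd k (t : Int) (u : Int) (pvGetN grid (iN + t) (jN + u))
            + b * pvHoleInd k (t : Int) (u : Int) (pvGetN grid (iN + t) (jN + u)) := by
      intro t ht u hu
      simp only [Finset.mem_range] at ht hu
      unfold pvW
      rw [hcell t u]
      exact cell_identity k a b (t : Int) (u : Int) _ (by omega) (by omega) (by omega)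
    rw [Finset.sum_congr rfl (fun t ht => Finset.sum_congr rfl (fun u hu => hpt t ht u hu))]
    simp only [Finset.sum_sub_distrib, Finset.sum_add_distrib, ← Finset.mul_sum]
    rw [hkκ]
    rw [shape_count κ]
  rw [hwin]
  simp only [hcell]
  have houts : (∑ x ∈ Finset.range grid.length, ∑ y ∈ Finset.range ((PySem.List.pyGet? grid 0).getD []).length,
      (if pvGet2 ((((PySem.List.pyRange 0 ((3 * κ : Nat) : Int) 1).flatMap (fun ii =>
            (PySem.List.pyRange 0 ((3 * κ : Nat) : Int) 1).map (fun jj => (i + ii, j + jj))))).foldl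
            (fun t p => pvSet2 t p.1 p.2 "@") grid)
          (x : Int) (y : Int) ≠ "@" then (if pvGet2 grid (x : Int) (y : Int) = "." then 0 else b) else 0))
      = b * (∑ x ∈ Finset.range R, ∑ y ∈ Finset.range W, pvChInd (pvGetN grid x y))
        - b * (∑ t ∈ Finset.range (3 * κ), ∑ u ∈ Finset.range (3 * κ), pvChInd (pvGetN grid (iN + t) (jN + u))) := by
    have hpt : ∀ x ∈ Finset.range R, ∀ y ∈ Finset.range W,
        (if pvGet2 ((((PySem.List.pyRange 0 ((3 * κ : Nat) : Int) 1).flatMap (fun ii =>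
              (PySem.List.pyRange 0 ((3 * κ : Nat) : Int) 1).map (fun jj => (i + ii, j + jj))))).foldl
              (fun t p => pvSet2 t p.1 p.2 "@") grid)
            (x : Int) (y : Int) ≠ "@" then (if pvGet2 grid (x : Int) (y : Int) = "." then 0 else b) else 0)
        = (if (iN ≤ x ∧ x < iN + 3 * κ) ∧ (jN ≤ y ∧ y < jN + 3 * κ) then 0
           else b * pvChInd (pvGetN grid x y)) := by
      intro x hx y hy
      simp only [Finset.mem_range] at hx hy
      rw [pvGet2_natCast, pvGet2_natCast,
        pvGetN_foldl_mark _ (winList_nonneg i j (3 * κ) hi hj) grid x y hx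
          (by have := hrow' x hx; omega)]
      by_cases hmem : (((x : Nat) : Int), ((y : Nat) : Int)) ∈ (PySem.List.pyRange 0 ((3 * κ : Nat) : Int) 1).flatMap (fun ii =>
          (PySem.List.pyRange 0 ((3 * κ : Nat) : Int) 1).map (fun jj => (i + ii, j + jj)))
      · have hreg : (iN ≤ x ∧ x < iN + 3 * κ) ∧ (jN ≤ y ∧ y < jN + 3 * κ) := by
          have := (mem_winList i j (3 * κ) x y).1 hmem
          omega
        rw [if_pos hmem, if_pos hreg]
        simp
      · have hreg : ¬((iN ≤ x ∧ x < iN + 3 * κ) ∧ (jN ≤ y ∧ y < jN + 3 * κ)) := by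
          intro hc
          exact hmem ((mem_winList i j (3 * κ) x y).2 (by omega))
        rw [if_neg hreg, if_neg hmem]
        rcases hdom x y hx hy with h1 | h1 <;> simp [h1, pvChInd]
    rw [Finset.sum_congr rfl (fun x hx => Finset.sum_congr rfl (fun y hy => hpt x hx y hy))]
    have hpt2 : ∀ x y : Nat,
        (if (iN ≤ x ∧ x < iN + 3 * κ) ∧ (jN ≤ y ∧ y < jN + 3 * κ) then (0 : Int)
         else b * pvChInd (pvGetN grid x y))
        = b * pvChInd (pvGetN grid x y)
          - b * (if (iN ≤ x ∧ x < iN + 3 * κ) ∧ (jN ≤ y ∧ y < jN + 3 * κ) then pvChInd (pvGetN grid x y) else 0) := by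
      intro x y
      by_cases h : (iN ≤ x ∧ x < iN + 3 * κ) ∧ (jN ≤ y ∧ y < jN + 3 * κ) <;> simp [h]
    simp only [hpt2, Finset.sum_sub_distrib, ← Finset.mul_sum]
    congr 1
    have hinner : ∀ x : Nat,
        (∑ y ∈ Finset.range W, (if (iN ≤ x ∧ x < iN + 3 * κ) ∧ (jN ≤ y ∧ y < jN + 3 * κ) then pvChInd (pvGetN grid x y) else 0))
        = (if iN ≤ x ∧ x < iN + 3 * κ then ∑ u ∈ Finset.range (3 * κ), pvChInd (pvGetN grid x (jN + u)) else 0) := by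
      intro x
      by_cases hx : iN ≤ x ∧ x < iN + 3 * κ
      · rw [if_pos hx, ← sum_shift W (3 * κ) jN hjW (fun y => pvChInd (pvGetN grid x y))]
        exact Finset.sum_congr rfl (fun y _ => by simp [hx])
      · rw [if_neg hx]
        exact Finset.sum_eq_zero (fun y _ => by simp [hx])
    simp only [hinner]
    rw [sum_shift R (3 * κ) iN hiR (fun x => ∑ u ∈ Finset.range (3 * κ), pvChInd (pvGetN grid x (jN + u)))]
  rw [houts, hkκ]
  ring

theorem foldl_state_id {β T : Type} (l : List β) (s : T) : l.foldl (fun s _ => s) s = s := by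
  induction l <;> simp_all

theorem main_eq (grid : List (List String)) (k a b : Int)
    (hpre : Pre_sliding_winodw grid k a b) :
    sliding_winodw grid k a b = sliding_winodw_alt grid k a b := by
  obtain ⟨hk, hfitimp⟩ := hpre
  by_cases hgE : grid = []
  · subst hgE
    have hA : sliding_winodw [] k a b = PySem.Set.empty := by
      unfold sliding_winodw
      dsimp only
      rw [show PySem.List.pyRange 0 (((([] : List (List String)).length : Int)) - k * 3 + 1) 1 = []
        from PySem.List.pyRange_one_eq_nil (by first | omega | (simp; omega))]
      rfl
    have hB : sliding_winodw_alt [] k a b = PySem.Set.empty := by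
      unfold sliding_winodw_alt
      dsimp only
      rw [show PySem.List.pyRange 0 (((([] : List (List String)).length : Int)) - 3 * k + 1) 1 = []
        from PySem.List.pyRange_one_eq_nil (by first | omega | (simp; omega))]
      rfl
    rw [hA, hB]
  · have hW0 : ((PySem.List.pyGet? grid 0).getD []) = grid.headD [] := by
      cases grid with
      | nil => exact absurd rfl hgE
      | cons r rest => rw [PySem.List.pyGet?_zero_cons]; rfl
    have hR1 : 1 ≤ grid.length := by
      cases grid with
      | nil => exact absurd rfl hgE
      | cons r rest => simpa using Nat.le_add_left 1 rest.length
    have hcols : (if grid.length = 0 then (0 : Int) else (((PySem.List.pyGet? grid 0).getD []).length : Int))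
        = (((PySem.List.pyGet? grid 0).getD []).length : Int) := by
      rw [if_neg (by omega)]
    by_cases hfit : 3 * k ≤ (grid.length : Int) ∧ 3 * k ≤ (((grid.headD []).length : Nat) : Int)
    · -- placements exist: the natural-domain facts from Pre_ apply
      obtain ⟨hrow0, hcells0⟩ := hfitimp hfit
      have hrow : ∀ row ∈ grid, ((PySem.List.pyGet? grid 0).getD []).length ≤ row.length := by
        rw [hW0]; exact hrow0
      have hdom : ∀ x y : Nat, x < grid.length → y < ((PySem.List.pyGet? grid 0).getD []).length →
          pvGetN grid x y = "." ∨ pvGetN grid x y = "#" := by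
        intro x y hx hy
        rw [hW0] at hy
        have hmem : grid.getD x [] ∈ grid := by
          rw [getD_eq_getElem_of_lt grid x hx]; exact List.getElem_mem hx
        have hlen : (grid.headD []).length ≤ (grid.getD x []).length := hrow0 _ hmem
        have hylt : y < (grid.getD x []).length := by omega
        have hgd : (grid.getD x []).getD y "" = (grid.getD x [])[y] := by
          rw [List.getD_eq_getElem?_getD, List.getElem?_eq_getElem hylt]; rfl
        have hmem2 : (grid.getD x [])[y] ∈ (grid.getD x []).take (grid.headD []).length := by
          have : ((grid.getD x []).take (grid.headD []).length)[y]'(by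
            rw [List.length_take]; omega) = (grid.getD x [])[y] := by
            simp [List.getElem_take]
          rw [← this]
          exact List.getElem_mem _
        have := hcells0 _ hmem _ hmem2
        rw [pvGetN, hgd]
        exact this
      unfold sliding_winodw sliding_winodw_alt
      dsimp only
      rw [hcols]
      have h33 : 3 * k = k * 3 := by ring
      rw [h33]
      refine PySem.List.foldl_congr_mem _ _ _ _ ?_
      intro acc i hi
      rw [PySem.List.mem_pyRange_one] at hi
      refine PySem.List.foldl_congr_mem _ _ _ _ ?_
      intro acc2 j hj
      rw [PySem.List.mem_pyRange_one] at hj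
      rw [← h33,
        placement_cost_eq grid k a b i j hk hrow hdom hi.1 (by omega) hj.1
          (by rw [hW0] at hj ⊢; omega)]
    · -- no placement fits: both sides fold over an empty range (or an identity fold)
      unfold sliding_winodw sliding_winodw_alt
      dsimp only
      rw [hcols]
      have h33 : 3 * k = k * 3 := by ring
      rw [h33]
      rcases (by rw [hW0]; omega :
          (grid.length : Int) < k * 3 ∨ (((PySem.List.pyGet? grid 0).getD []).length : Int) < k * 3) with h | h
      · rw [PySem.List.pyRange_one_eq_nil (show (grid.length : Int) - k * 3 + 1 ≤ 0 by omega)]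
        rfl
      · rw [PySem.List.pyRange_one_eq_nil
          (show (((PySem.List.pyGet? grid 0).getD []).length : Int) - k * 3 + 1 ≤ 0 by omega)]
        refine Eq.trans (Eq.trans (PySem.List.foldl_congr_mem _ _ (fun tc _ => tc) _
            (fun acc i _ => rfl)) (foldl_state_id _ _))
          (Eq.trans (Eq.trans (PySem.List.foldl_congr_mem _ _ (fun tc _ => tc) _
            (fun acc i _ => rfl)) (foldl_state_id _ _)) rfl).symm

-- ===== VERDICT (by name: the statement is the Claim_ definition above) =====
theorem sliding_winodw_spec : Claim_equal_sliding_winodw := by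
  intro grid k a b _ hpre
  unfold Spec_sliding_winodw
  exact main_eq grid k a b hpre
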